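-- pv_equiv track=rewrite | github.com/VuxNhaan/Python-Tu-hocj | Lap2_List/BT1.py | Bai12
-- ===== SOURCE A (Python) =====
-- def Bai12(a):
--     n = len(a)
--     maxN = 0
--     max = 0
--     star = -1
--     for i in range(0, n -1):
--         if a[i] >= 0:
--             max += 1
--             if max > maxN:
--                 maxN = max
--                 star = i - max + 1
--         else:
--             max = 0
--     return star
-- ===== SOURCE B (Python) =====
-- def Bai12(a):
--     body = a[:-1]
--     segs = []
--     run = 0
--     for i, x in enumerate(body):
--         if x >= 0:
--             run += 1
--         else:
--             if run != 0:
--                 segs.append((i - run, run))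
--             run = 0
--     if run != 0:
--         segs.append((len(body) - run, run))
--     best = (-1, 0)
--     for s, l in segs:
--         if l > best[1]:
--             best = (s, l)
--     return best[0]
-- ===== Notes on version B (the rewrite author's own statement) =====
-- stated objective: alternative
-- what changed: B replaces A's inline run/maximum tracking with a two-phase pass: first collect all non-negative segments of a[:-1] as (start, length) pairs, then scan the segment list once for the first longest one.
import Mathlib
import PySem

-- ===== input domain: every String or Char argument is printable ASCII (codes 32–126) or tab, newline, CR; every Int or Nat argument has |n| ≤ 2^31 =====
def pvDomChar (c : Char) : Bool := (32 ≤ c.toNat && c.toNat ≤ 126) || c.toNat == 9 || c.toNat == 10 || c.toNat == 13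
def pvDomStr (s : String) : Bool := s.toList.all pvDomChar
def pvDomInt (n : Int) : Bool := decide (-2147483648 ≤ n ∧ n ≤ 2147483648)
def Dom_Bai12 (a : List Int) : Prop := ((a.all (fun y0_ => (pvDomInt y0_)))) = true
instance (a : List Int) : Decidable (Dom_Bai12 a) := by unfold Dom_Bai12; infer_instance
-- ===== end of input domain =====

-- B replaces A's inline run/maximum tracking with a two-phase pass (collect the (start, length)
-- non-negative segments of a[:-1], then scan them once for the first longest); objective: alternative.

-- ===== PORT A =====
-- loop body of A's single for-loop (state = (maxN, max, star), p = (i, a[i]))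
def stepA (st : Int × Int × Int) (p : Int × Int) : Int × Int × Int :=
  if p.2 ≥ 0 then
    let mx := st.2.1 + 1
    if mx > st.1 then (mx, mx, p.1 - mx + 1) else (st.1, mx, st.2.2)
  else (st.1, 0, st.2.2)

-- for i in range(0, n-1): …  a[i] via pyGetD (the index is always in range, so the default is never used)
def Bai12 (a : List Int) : Int :=
  let n : Int := a.length
  let st := (PySem.List.pyRange 0 (n - 1) 1).foldl
    (fun st i => stepA st (i, PySem.List.pyGetD a i 0)) (0, 0, -1)
  st.2.2

-- ===== PORT B =====
-- loop body of B's collector pass (state = (segs, run), p = (i, x))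
def stepB (st : List (Int × Int) × Int) (p : Int × Int) : List (Int × Int) × Int :=
  if p.2 ≥ 0 then (st.1, st.2 + 1)
  else if st.2 ≠ 0 then (st.1 ++ [(p.1 - st.2, st.2)], 0) else (st.1, 0)

-- B's final scan: first segment with strictly greatest length, default (-1, 0)
def bestOf (segs : List (Int × Int)) : Int × Int :=
  segs.foldl (fun b s => if s.2 > b.2 then s else b) (-1, 0)

def Bai12_alt (a : List Int) : Int :=
  let body := a.dropLast          -- a[:-1]
  let st := (PySem.List.enumerate body 0).foldl stepB ([], 0)
  let segs := if st.2 ≠ 0 then st.1 ++ [((body.length : Int) - st.2, st.2)] else st.1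
  (bestOf segs).1

-- ===== PRECONDITION & SPEC =====
def Spec_Bai12 (a : List Int) (out : Int) : Prop := out = Bai12_alt a
instance (a : List Int) (out : Int) : Decidable (Spec_Bai12 a out) := by unfold Spec_Bai12; infer_instance

-- ===== CLAIM (what is proved, stated in full; the proofs are below) =====
def Claim_equal_Bai12 : Prop := ∀ (a : List Int), Dom_Bai12 a → Spec_Bai12 a (Bai12 a)

-- ===== LEMMAS AND PROOFS =====

-- the segment list including the run still pending at index i
def close (i : Int) (segs : List (Int × Int)) (run : Int) : List (Int × Int) :=
  if run ≠ 0 then segs ++ [(i - run, run)] else segs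

lemma bestOf_append (segs : List (Int × Int)) (p : Int × Int) :
    bestOf (segs ++ [p]) = if p.2 > (bestOf segs).2 then p else bestOf segs := by
  simp [bestOf, List.foldl_append]

lemma bestOf_snd_nonneg (segs : List (Int × Int)) : (0:Int) ≤ (bestOf segs).2 := by
  suffices h : ∀ init : Int × Int, init.2 ≤ (segs.foldl (fun b s => if s.2 > b.2 then s else b) init).2 from h (-1, 0)
  induction segs with
  | nil => intro init; simp
  | cons p l ihl =>
    intro init
    simp only [List.foldl_cons]
    split_ifs with h
    · exact le_trans h.le (ihl _)
    · exact ihl init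

-- main loop invariant: A's (maxN, star) is the first-longest of the segments closed so far
-- together with the run still pending at the current index, and A's counter equals B's run
lemma loop_eq (l : List Int) : ∀ (s : Int) (segs : List (Int × Int)) (run maxN star : Int),
    0 ≤ run → maxN = (bestOf (close s segs run)).2 → star = (bestOf (close s segs run)).1 →
    ((PySem.List.enumerate l s).foldl stepA (maxN, run, star)).2.2
      = (bestOf (close (s + l.length)
          ((PySem.List.enumerate l s).foldl stepB (segs, run)).1
          ((PySem.List.enumerate l s).foldl stepB (segs, run)).2)).1 := by
  induction l with
  | nil =>
    intro s segs run maxN star h0 hN hS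
    simpa [PySem.List.enumerate] using hS
  | cons x xs ih =>
    intro s segs run maxN star h0 hN hS
    rw [PySem.List.enumerate_cons]
    simp only [List.foldl_cons, List.length_cons]
    have hlen : s + ((xs.length + 1 : Nat) : Int) = (s + 1) + (xs.length : Int) := by push_cast; ring
    by_cases hx : (0:Int) ≤ x
    · -- non-negative element
      have hA : stepA (maxN, run, star) (s, x) =
          (if run + 1 > maxN then ((run+1), (run+1), s - run) else (maxN, run+1, star)) := by
        simp [stepA, hx]
        split_ifs <;> simp <;> ring_nf
      have hB : stepB (segs, run) (s, x) = (segs, run + 1) := by simp [stepB, hx]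
      rw [hA, hB]
      have hC : close (s+1) segs (run+1) = segs ++ [(s - run, run + 1)] := by
        have h1 : run + 1 ≠ 0 := by omega
        have h2 : s + 1 - (run + 1) = s - run := by ring
        simp [close, h1, h2]
      have hnn : (0:Int) ≤ (bestOf segs).2 := bestOf_snd_nonneg segs
      have hMS : (run ≤ (bestOf segs).2 ∧ maxN = (bestOf segs).2 ∧ star = (bestOf segs).1)
               ∨ ((bestOf segs).2 < run ∧ maxN = run ∧ star = s - run) := by
        by_cases hr : run = 0
        · subst hr; simp [close] at hN hS; exact Or.inl ⟨hnn, hN, hS⟩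
        · rw [show close s segs run = segs ++ [(s - run, run)] from by simp [close, hr],
              bestOf_append] at hN hS
          by_cases hgt : run > (bestOf segs).2
          · right; rw [if_pos hgt] at hN hS; exact ⟨hgt, hN, hS⟩
          · left; rw [if_neg hgt] at hN hS; exact ⟨le_of_not_gt hgt, hN, hS⟩
      rw [hlen]
      by_cases hgt : run + 1 > maxN
      · rw [if_pos hgt]
        apply ih (s+1) segs (run+1) (run+1) (s-run) (by omega)
        · rw [hC, bestOf_append, if_pos (by rcases hMS with ⟨h1,h2,h3⟩|⟨h1,h2,h3⟩ <;> omega)]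
        · rw [hC, bestOf_append, if_pos (by rcases hMS with ⟨h1,h2,h3⟩|⟨h1,h2,h3⟩ <;> omega)]
      · rw [if_neg hgt]
        rcases hMS with ⟨h1,h2,h3⟩|⟨h1,h2,h3⟩
        · apply ih (s+1) segs (run+1) maxN star (by omega)
          · rw [hC, bestOf_append, if_neg (by omega), h2]
          · rw [hC, bestOf_append, if_neg (by omega), h3]
        · omega
    · -- negative element
      have hA : stepA (maxN, run, star) (s, x) = (maxN, 0, star) := by simp [stepA, hx]
      have hB : stepB (segs, run) (s, x) = (close s segs run, 0) := by
        by_cases hr : run = 0 <;> simp [stepB, hx, close, hr]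
      rw [hA, hB, hlen]
      have h2 : close (s+1) (close s segs run) 0 = close s segs run := by simp [close]
      exact ih (s+1) (close s segs run) 0 maxN star le_rfl (by rw [h2, hN]) (by rw [h2, hS])

lemma Bai12_eq (a : List Int) : Bai12 a = Bai12_alt a := by
  have hrange : PySem.List.pyRange 0 ((a.length : Int) - 1) 1
      = PySem.List.pyRange 0 ((a.dropLast.length : Int)) 1 := by
    cases a with
    | nil => simp
    | cons x xs => simp [List.length_dropLast]
  have hbridge : (PySem.List.pyRange 0 ((a.length : Int) - 1) 1).foldl
      (fun st i => stepA st (i, PySem.List.pyGetD a i 0)) ((0:Int), (0:Int), (-1:Int))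
      = (PySem.List.enumerate a.dropLast 0).foldl stepA (0, 0, -1) := by
    rw [hrange, PySem.List.enumerate_eq_map_pyRange (d := 0), List.foldl_map]
    apply PySem.List.foldl_congr_mem
    intro acc i hi
    rw [PySem.List.mem_pyRange_one] at hi
    congr 1
    have hlt : i < (a.length : Int) := by
      have := hi.2
      cases a with
      | nil => simpa using this
      | cons x xs => simp [List.length_dropLast] at this ⊢; omega
    rw [PySem.List.pyGetD_eq_getElem _ _ hi.1 (by simpa using hlt),
        PySem.List.pyGetD_eq_getElem _ _ hi.1 (by simpa using hi.2)]
    simp [List.getElem_dropLast]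
  have h0 : (0:Int) = (bestOf (close 0 [] 0)).2 := by simp [close, bestOf]
  have h1 : (-1:Int) = (bestOf (close 0 [] 0)).1 := by simp [close, bestOf]
  have hmain := loop_eq a.dropLast 0 [] 0 0 (-1) le_rfl h0 h1
  simp only [Bai12, Bai12_alt, hbridge]
  rw [hmain]
  congr 1
  simp [close]

-- ===== VERDICT (by name: the statement is the Claim_ definition above) =====
theorem Bai12_spec : Claim_equal_Bai12 := fun a _ => Bai12_eq a
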